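-- pv_equiv track=rewrite | github.com/VagelisKalimeris/clustering-and-misinformation | util_funcs.py | get_posts_and_retweets
-- ===== SOURCE A (Python) =====
-- def get_posts_and_retweets(news_user, real_range, fake_range):
--     real_posts_arr, fake_posts_arr, = [], []
--     real_retweets_sum, fake_retweets_sum = 0, 0
--     for line in news_user:
--         if int(line[0]) in real_range:
--             real_posts_arr.append(int(line[1]))
--             real_retweets_sum += int(line[2])
--         elif int(line[0]) in fake_range:
--             fake_posts_arr.append(int(line[1]))
--             fake_retweets_sum += int(line[2])
--     return real_posts_arr, fake_posts_arr, real_retweets_sum, fake_retweets_sum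
-- ===== SOURCE B (Python) =====
-- def get_posts_and_retweets(news_user, real_range, fake_range):
--     lines = list(news_user)
--     real_lines = [l for l in lines if int(l[0]) in real_range]
--     fake_lines = [l for l in lines
--                   if int(l[0]) in fake_range and int(l[0]) not in real_range]
--     real_posts_arr = [int(l[1]) for l in real_lines]
--     fake_posts_arr = [int(l[1]) for l in fake_lines]
--     real_retweets_sum = sum(int(l[2]) for l in real_lines)
--     fake_retweets_sum = sum(int(l[2]) for l in fake_lines)
--     return real_posts_arr, fake_posts_arr, real_retweets_sum, fake_retweets_sum
-- ===== Notes on version B (the rewrite author's own statement) =====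
-- stated objective: alternative
-- what changed: Replaces A's single interleaved pass with four mutable accumulators by a filter-first pipeline: two partition lists (fake filter excludes real ids to keep A's elif priority), then separate map and sum passes build the four results.
import Mathlib
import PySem

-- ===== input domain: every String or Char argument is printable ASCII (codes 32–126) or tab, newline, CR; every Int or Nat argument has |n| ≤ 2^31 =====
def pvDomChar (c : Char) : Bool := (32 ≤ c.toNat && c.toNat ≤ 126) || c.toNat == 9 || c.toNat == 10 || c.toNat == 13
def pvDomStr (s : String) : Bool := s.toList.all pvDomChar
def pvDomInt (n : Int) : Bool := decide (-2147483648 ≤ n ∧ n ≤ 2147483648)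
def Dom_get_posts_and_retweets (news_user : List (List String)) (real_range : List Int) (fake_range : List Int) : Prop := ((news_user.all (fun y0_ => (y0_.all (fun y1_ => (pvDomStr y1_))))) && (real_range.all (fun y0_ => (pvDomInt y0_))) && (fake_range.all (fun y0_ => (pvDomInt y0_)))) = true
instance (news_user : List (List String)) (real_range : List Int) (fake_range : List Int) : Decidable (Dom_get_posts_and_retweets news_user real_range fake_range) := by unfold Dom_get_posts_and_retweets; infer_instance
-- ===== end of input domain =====

-- B replaces A's single interleaved accumulator loop by a filter-first pipeline (partition lists, then map/sum passes); alternative decomposition, same cost.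


-- int(line[i]) for a line admitted by Pre_; returns 0 outside Pre_ (where Python raises)
def pvField (line : List String) (i : Int) : Int :=
  (((PySem.List.pyGet? line i).bind PySem.Int.ofStr?).getD 0)

-- ===== PORT A =====
def get_posts_and_retweets (news_user : List (List String)) (real_range : List Int) (fake_range : List Int) : List Int × List Int × Int × Int :=
  news_user.foldl
    (fun (st : List Int × List Int × Int × Int) line =>
      let (ra, fa, rs, fs) := st
      if pvField line 0 ∈ real_range then
        (ra ++ [pvField line 1], fa, rs + pvField line 2, fs)
      else if pvField line 0 ∈ fake_range then
        (ra, fa ++ [pvField line 1], rs, fs + pvField line 2)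
      else (ra, fa, rs, fs))
    ([], [], 0, 0)

-- ===== PORT B =====
def get_posts_and_retweets_alt (news_user : List (List String)) (real_range : List Int) (fake_range : List Int) : List Int × List Int × Int × Int :=
  let real_lines := news_user.filter (fun l => pvField l 0 ∈ real_range)
  let fake_lines := news_user.filter (fun l => pvField l 0 ∈ fake_range ∧ pvField l 0 ∉ real_range)
  (real_lines.map (fun l => pvField l 1),
   fake_lines.map (fun l => pvField l 1),
   (real_lines.map (fun l => pvField l 2)).sum,
   (fake_lines.map (fun l => pvField l 2)).sum)

-- ===== PRECONDITION & SPEC =====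
-- a line is fine for A iff its id field exists and parses, and whenever that id falls in
-- either range the post and retweet fields exist and parse too (Python raises otherwise)
def pvLineOK (real_range fake_range : List Int) (line : List String) : Bool :=
  match (PySem.List.pyGet? line 0).bind PySem.Int.ofStr? with
  | none => false
  | some id =>
    if id ∈ real_range ∨ id ∈ fake_range then
      ((PySem.List.pyGet? line 1).bind PySem.Int.ofStr?).isSome
        && ((PySem.List.pyGet? line 2).bind PySem.Int.ofStr?).isSome
    else true

-- Pre_ is exactly the inputs on which Python A returns (no IndexError/ValueError on any line)
def Pre_get_posts_and_retweets (news_user : List (List String)) (real_range : List Int) (fake_range : List Int) : Prop :=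
  news_user.all (pvLineOK real_range fake_range) = true
instance (news_user : List (List String)) (real_range : List Int) (fake_range : List Int) : Decidable (Pre_get_posts_and_retweets news_user real_range fake_range) := by unfold Pre_get_posts_and_retweets; infer_instance
def pvWitness_get_posts_and_retweets : List (List String) × List Int × List Int :=
  ([["1", "10", "2"], ["3", "4", "5"], ["9", "0", "0"]], [1, 2], [3])

def Spec_get_posts_and_retweets (news_user : List (List String)) (real_range : List Int) (fake_range : List Int) (out : List Int × List Int × Int × Int) : Prop := out = get_posts_and_retweets_alt news_user real_range fake_range
instance (news_user : List (List String)) (real_range : List Int) (fake_range : List Int) (out : List Int × List Int × Int × Int) : Decidable (Spec_get_posts_and_retweets news_user real_range fake_range out) := by unfold Spec_get_posts_and_retweets; infer_instance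

-- ===== CLAIM (what is proved, stated in full; the proofs are below) =====
def Claim_equal_get_posts_and_retweets : Prop := ∀ (news_user : List (List String)) (real_range : List Int) (fake_range : List Int), Dom_get_posts_and_retweets news_user real_range fake_range → Pre_get_posts_and_retweets news_user real_range fake_range → Spec_get_posts_and_retweets news_user real_range fake_range (get_posts_and_retweets news_user real_range fake_range)

-- ===== LEMMAS AND PROOFS =====

-- invariant of A's fold: it extends any starting accumulator by B's filtered maps/sums
theorem pv_fold_char (real_range fake_range : List Int) :
    ∀ (nu : List (List String)) (ra fa : List Int) (rs fs : Int),
      nu.foldl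
        (fun (st : List Int × List Int × Int × Int) line =>
          let (ra, fa, rs, fs) := st
          if pvField line 0 ∈ real_range then
            (ra ++ [pvField line 1], fa, rs + pvField line 2, fs)
          else if pvField line 0 ∈ fake_range then
            (ra, fa ++ [pvField line 1], rs, fs + pvField line 2)
          else (ra, fa, rs, fs))
        (ra, fa, rs, fs)
      = (ra ++ (nu.filter (fun l => pvField l 0 ∈ real_range)).map (fun l => pvField l 1),
         fa ++ (nu.filter (fun l => pvField l 0 ∈ fake_range ∧ pvField l 0 ∉ real_range)).map (fun l => pvField l 1),
         rs + ((nu.filter (fun l => pvField l 0 ∈ real_range)).map (fun l => pvField l 2)).sum,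
         fs + ((nu.filter (fun l => pvField l 0 ∈ fake_range ∧ pvField l 0 ∉ real_range)).map (fun l => pvField l 2)).sum) := by
  intro nu
  induction nu with
  | nil => intro ra fa rs fs; simp
  | cons line rest ih =>
    intro ra fa rs fs
    by_cases hr : pvField line 0 ∈ real_range
    · simp only [List.foldl_cons, List.filter_cons, hr, ih]
      simp [add_assoc]
    · by_cases hf : pvField line 0 ∈ fake_range
      · simp only [List.foldl_cons, List.filter_cons, ih]
        simp [hr, hf, add_assoc]
      · simp only [List.foldl_cons, List.filter_cons, ih]
        simp [hr, hf]

-- ===== VERDICT (by name: the statement is the Claim_ definition above) =====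
theorem get_posts_and_retweets_spec : Claim_equal_get_posts_and_retweets := by
  intro news_user real_range fake_range _ _
  show get_posts_and_retweets news_user real_range fake_range = _
  unfold get_posts_and_retweets get_posts_and_retweets_alt
  rw [pv_fold_char]
  simp
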